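-- pv_equiv track=rewrite | github.com/pbmconsulting-hub/NBA_API_Smart_Pick_Pro_AI | SmartPicksProAI/engine/joseph_tickets.py | _check_ticket_correlation
-- ===== SOURCE A (Python) =====
-- def _check_ticket_correlation(legs: list[dict]) -> str:
--     """Check for correlated legs on the ticket."""
--     # Check same-game correlation
--     game_ids = [leg.get("game_id", "") for leg in legs if leg.get("game_id")]
--     seen_games: dict[str, int] = {}
--     for gid in game_ids:
--         if gid:
--             seen_games[gid] = seen_games.get(gid, 0) + 1
--
--     same_game_count = sum(1 for v in seen_games.values() if v > 1)
--
--     # Check same-team correlation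
--     teams = [leg.get("team", "") for leg in legs if leg.get("team")]
--     seen_teams: dict[str, int] = {}
--     for t in teams:
--         if t:
--             seen_teams[t] = seen_teams.get(t, 0) + 1
--
--     same_team_count = sum(1 for v in seen_teams.values() if v > 1)
--
--     warnings: list[str] = []
--     if same_game_count > 0:
--         warnings.append(
--             f"⚠️ {same_game_count} game(s) with multiple legs — "
--             f"same-game legs are correlated."
--         )
--     if same_team_count > 0:
--         warnings.append(
--             f"⚠️ {same_team_count} team(s) with multiple legs — "
--             f"same-team props can move together."
--         )
--
--     return " ".join(warnings) if warnings else ""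
-- ===== SOURCE B (Python) =====
-- def _check_ticket_correlation(legs: list[dict]) -> str:
--     """Check for correlated legs on the ticket."""
--     # Single pass: maintain seen/dup sets for games and teams.
--     seen_games, dup_games = set(), set()
--     seen_teams, dup_teams = set(), set()
--     for leg in legs:
--         gid = leg.get("game_id")
--         if gid:
--             if gid in seen_games:
--                 dup_games.add(gid)
--             else:
--                 seen_games.add(gid)
--         team = leg.get("team")
--         if team:
--             if team in seen_teams:
--                 dup_teams.add(team)
--             else:
--                 seen_teams.add(team)
--
--     same_game_count = len(dup_games)
--     same_team_count = len(dup_teams)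
--
--     warnings: list[str] = []
--     if same_game_count > 0:
--         warnings.append(
--             f"⚠️ {same_game_count} game(s) with multiple legs — "
--             f"same-game legs are correlated."
--         )
--     if same_team_count > 0:
--         warnings.append(
--             f"⚠️ {same_team_count} team(s) with multiple legs — "
--             f"same-team props can move together."
--         )
--
--     return " ".join(warnings) if warnings else ""
-- ===== Notes on version B (the rewrite author's own statement) =====
-- stated objective: simpler
-- what changed: Replaces A's two-phase per-key work (build a list of ids, build a frequency dict, then sum the values greater than 1) with one pass over the legs maintaining seen/dup sets for games and teams; the counts are the sizes of the dup sets.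
import Mathlib
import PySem

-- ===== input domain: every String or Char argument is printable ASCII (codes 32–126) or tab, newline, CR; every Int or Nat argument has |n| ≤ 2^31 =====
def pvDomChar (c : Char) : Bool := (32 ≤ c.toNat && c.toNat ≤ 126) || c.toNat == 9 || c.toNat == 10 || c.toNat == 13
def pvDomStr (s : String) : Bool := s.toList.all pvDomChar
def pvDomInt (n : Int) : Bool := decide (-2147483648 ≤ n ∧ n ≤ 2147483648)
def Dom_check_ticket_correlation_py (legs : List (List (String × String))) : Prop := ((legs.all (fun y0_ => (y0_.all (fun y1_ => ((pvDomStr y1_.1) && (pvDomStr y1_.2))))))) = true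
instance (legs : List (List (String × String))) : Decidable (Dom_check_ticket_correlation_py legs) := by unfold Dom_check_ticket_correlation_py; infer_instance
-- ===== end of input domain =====

-- B replaces A's build-id-list / frequency-dict / sum-values-over-1 phases by one pass over the
-- legs maintaining seen/dup sets; objective: simpler (same asymptotic cost).

-- leg.get(k, "") / truthiness of leg.get(k): first-match lookup, default ""
def pvLegGet (leg : List (String × String)) (k : String) : String :=
  ((PySem.Dict.mk leg).get? k).getD ""

-- ===== PORT A =====
def check_ticket_correlation_py (legs : List (List (String × String))) : String :=
  let game_ids := (legs.filter (fun leg => pvLegGet leg "game_id" != "")).map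
      (fun leg => pvLegGet leg "game_id")
  let seen_games := game_ids.foldl
      (fun d gid => if gid != "" then d.insert gid (d.getD gid 0 + 1) else d)
      (PySem.Dict.empty : PySem.Dict String Int)
  let same_game_count : Int :=
      (PySem.Dict.values seen_games).foldl (fun acc v => if 1 < v then acc + 1 else acc) 0
  let teams := (legs.filter (fun leg => pvLegGet leg "team" != "")).map
      (fun leg => pvLegGet leg "team")
  let seen_teams := teams.foldl
      (fun d t => if t != "" then d.insert t (d.getD t 0 + 1) else d)
      (PySem.Dict.empty : PySem.Dict String Int)
  let same_team_count : Int :=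
      (PySem.Dict.values seen_teams).foldl (fun acc v => if 1 < v then acc + 1 else acc) 0
  let warnings : List String := []
  let warnings := if 0 < same_game_count then
      warnings ++ ["⚠️ " ++ PySem.Int.toStr same_game_count ++
        " game(s) with multiple legs — same-game legs are correlated."] else warnings
  let warnings := if 0 < same_team_count then
      warnings ++ ["⚠️ " ++ PySem.Int.toStr same_team_count ++
        " team(s) with multiple legs — same-team props can move together."] else warnings
  if warnings != [] then PySem.Str.join " " warnings else ""

-- ===== PORT B =====
-- if x in seen: dup.add(x) else: seen.add(x)
def pvDupStep (p : PySem.Set String × PySem.Set String) (x : String) :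
    PySem.Set String × PySem.Set String :=
  if PySem.Set.contains p.1 x then (p.1, PySem.Set.add p.2 x) else (PySem.Set.add p.1 x, p.2)

def pvLegStepG (p : PySem.Set String × PySem.Set String) (leg : List (String × String)) :
    PySem.Set String × PySem.Set String :=
  if pvLegGet leg "game_id" != "" then pvDupStep p (pvLegGet leg "game_id") else p

def pvLegStepT (p : PySem.Set String × PySem.Set String) (leg : List (String × String)) :
    PySem.Set String × PySem.Set String :=
  if pvLegGet leg "team" != "" then pvDupStep p (pvLegGet leg "team") else p

def check_ticket_correlation_py_alt (legs : List (List (String × String))) : String :=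
  let st := legs.foldl (fun st leg => (pvLegStepG st.1 leg, pvLegStepT st.2 leg))
      (((PySem.Set.empty : PySem.Set String), (PySem.Set.empty : PySem.Set String)),
       ((PySem.Set.empty : PySem.Set String), (PySem.Set.empty : PySem.Set String)))
  let same_game_count : Int := PySem.Set.len st.1.2
  let same_team_count : Int := PySem.Set.len st.2.2
  let warnings : List String := []
  let warnings := if 0 < same_game_count then
      warnings ++ ["⚠️ " ++ PySem.Int.toStr same_game_count ++
        " game(s) with multiple legs — same-game legs are correlated."] else warnings
  let warnings := if 0 < same_team_count then
      warnings ++ ["⚠️ " ++ PySem.Int.toStr same_team_count ++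
        " team(s) with multiple legs — same-team props can move together."] else warnings
  if warnings != [] then PySem.Str.join " " warnings else ""

-- ===== PRECONDITION & SPEC =====
def Spec_check_ticket_correlation_py (legs : List (List (String × String))) (out : String) : Prop := out = check_ticket_correlation_py_alt legs
instance (legs : List (List (String × String))) (out : String) : Decidable (Spec_check_ticket_correlation_py legs out) := by unfold Spec_check_ticket_correlation_py; infer_instance

-- ===== CLAIM (what is proved, stated in full; the proofs are below) =====
def Claim_equal_check_ticket_correlation_py : Prop := ∀ (legs : List (List (String × String))), Dom_check_ticket_correlation_py legs → Spec_check_ticket_correlation_py legs (check_ticket_correlation_py legs)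

-- ===== LEMMAS AND PROOFS =====

-- the list of truthy values of key k, as A extracts it
def pvVals (legs : List (List (String × String))) (k : String) : List String :=
  (legs.filter (fun leg => pvLegGet leg k != "")).map (fun leg => pvLegGet leg k)

-- A's per-key count, as a function of the extracted value list
def pvCountA (xs : List String) : Int :=
  (PySem.Dict.values (xs.foldl
      (fun d x => if x != "" then d.insert x (d.getD x 0 + 1) else d)
      (PySem.Dict.empty : PySem.Dict String Int))).foldl
    (fun acc v => if 1 < v then acc + 1 else acc) 0

-- membership in the dup component of the seen/dup fold
theorem pvMem_dupsFold (xs : List String) (s d : List String) (y : String) :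
    y ∈ (xs.foldl pvDupStep (s, d)).2 ↔ y ∈ d ∨ (y ∈ s ∧ y ∈ xs) ∨ 2 ≤ xs.count y := by
  induction xs generalizing s d with
  | nil => simp
  | cons x rest ih =>
    simp only [List.foldl_cons, pvDupStep]
    by_cases hx : PySem.Set.contains s x
    · have hxs : x ∈ s := by simpa [PySem.Set.contains] using hx
      simp only [hx, if_pos]
      rw [ih]
      by_cases hy : y = x
      · subst hy
        simp [PySem.Set.mem_add, hxs, List.count_cons_self, List.mem_cons]
      · have hxy : ¬ x = y := fun h => hy h.symm
        simp only [PySem.Set.mem_add, hy, or_false, List.mem_cons,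
          List.count_cons, beq_iff_eq, if_neg hxy, add_zero, false_or]
    · have hxs : x ∉ s := by simpa [PySem.Set.contains] using hx
      simp only [hx, Bool.false_eq_true, if_neg, not_false_iff]
      rw [ih]
      by_cases hy : y = x
      · subst hy
        simp only [PySem.Set.mem_add, List.mem_cons, List.count_cons_self]
        have hc := List.count_pos_iff (a := y) (l := rest)
        constructor
        · rintro (h | ⟨hs', hr⟩ | h2)
          · exact Or.inl h
          · right; right; have := hc.mpr hr; omega
          · right; right; omega
        · rintro (h | ⟨hs', _⟩ | h2)
          · exact Or.inl h
          · exact absurd hs' hxs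
          · right; left
            exact ⟨Or.inr (by simp), hc.mp (by omega)⟩
      · have hxy : ¬ x = y := fun h => hy h.symm
        simp only [PySem.Set.mem_add, hy, or_false, List.mem_cons,
          List.count_cons, beq_iff_eq, if_neg hxy, add_zero, false_or]

-- both components of the seen/dup fold stay duplicate-free
theorem pvNodup_dupsFold (xs : List String) (s d : List String)
    (hs : s.Nodup) (hd : d.Nodup) :
    (xs.foldl pvDupStep (s, d)).1.Nodup ∧ (xs.foldl pvDupStep (s, d)).2.Nodup := by
  induction xs generalizing s d with
  | nil => exact ⟨hs, hd⟩
  | cons x rest ih =>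
    simp only [List.foldl_cons, pvDupStep]
    by_cases hx : PySem.Set.contains s x
    · simp only [hx, if_pos]
      exact ih s (PySem.Set.add d x) hs (PySem.Set.nodup_add d x hd)
    · simp only [hx, Bool.false_eq_true, if_neg, not_false_iff]
      exact ih (PySem.Set.add s x) d (PySem.Set.nodup_add s x hs) hd

-- core count equality: A's "keys with multiplicity > 1" = size of B's dup set
theorem pvCountA_eq_dups (xs : List String) (hx : ∀ x ∈ xs, x ≠ "") :
    pvCountA xs = ((xs.foldl pvDupStep (PySem.Set.empty, PySem.Set.empty)).2.length : Int) := by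
  unfold pvCountA
  rw [PySem.List.foldl_congr_mem xs _ (fun d x => d.insert x (d.getD x 0 + 1)) _
      (by intro acc x hxm; simp [hx x hxm])]
  rw [PySem.Dict.foldl_insert_getD_add_one_eq_counter]
  rw [PySem.List.foldl_ite_add_one (fun v : Int => 1 < v)]
  have hv : (PySem.Dict.counter xs).values
      = (PySem.Set.ofList xs).map (fun k => ((xs.count k : Nat) : Int)) := by
    show ((PySem.Dict.counter xs).items.map Prod.snd) = _
    rw [PySem.Dict.items_counter]
    simp [List.map_map]
  rw [hv, List.countP_map, List.countP_eq_length_filter]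
  have hperm : ((PySem.Set.ofList xs).filter
        ((fun v : Int => decide (1 < v)) ∘ fun k => ((xs.count k : Nat) : Int))).Perm
      (xs.foldl pvDupStep (PySem.Set.empty, PySem.Set.empty)).2 := by
    rw [List.perm_ext_iff_of_nodup
      ((PySem.Set.nodup_ofList xs).filter _)
      (pvNodup_dupsFold xs PySem.Set.empty PySem.Set.empty List.nodup_nil List.nodup_nil).2]
    intro a
    rw [pvMem_dupsFold, List.mem_filter, PySem.Set.mem_ofList]
    simp only [PySem.Set.empty, List.not_mem_nil, false_and, false_or, Function.comp_apply,
      decide_eq_true_eq]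
    constructor
    · rintro ⟨_, h⟩; omega
    · intro h
      exact ⟨List.count_pos_iff.mp (by omega), by push_cast; omega⟩
  rw [hperm.length_eq]
  simp

-- B's interleaved pass equals the seen/dup fold over A's extracted value list
theorem pvFoldG (legs : List (List (String × String))) (p : PySem.Set String × PySem.Set String) :
    legs.foldl pvLegStepG p = (pvVals legs "game_id").foldl pvDupStep p := by
  unfold pvVals pvLegStepG
  rw [PySem.List.foldl_if_eq_foldl_filter (fun leg => pvLegGet leg "game_id" != "")
      (fun q leg => pvDupStep q (pvLegGet leg "game_id"))]
  rw [List.foldl_map]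

theorem pvFoldT (legs : List (List (String × String))) (p : PySem.Set String × PySem.Set String) :
    legs.foldl pvLegStepT p = (pvVals legs "team").foldl pvDupStep p := by
  unfold pvVals pvLegStepT
  rw [PySem.List.foldl_if_eq_foldl_filter (fun leg => pvLegGet leg "team" != "")
      (fun q leg => pvDupStep q (pvLegGet leg "team"))]
  rw [List.foldl_map]

theorem pvVals_ne_empty (legs : List (List (String × String))) (k : String) :
    ∀ x ∈ pvVals legs k, x ≠ "" := by
  intro x hx
  unfold pvVals at hx
  obtain ⟨leg, hleg, rfl⟩ := List.mem_map.mp hx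
  have := (List.mem_filter.mp hleg).2
  simpa using this

-- ===== VERDICT (by name: the statement is the Claim_ definition above) =====
theorem check_ticket_correlation_py_spec : Claim_equal_check_ticket_correlation_py := by
  intro legs _
  unfold Spec_check_ticket_correlation_py check_ticket_correlation_py check_ticket_correlation_py_alt
  rw [PySem.List.foldl_prod_mk pvLegStepG pvLegStepT, pvFoldG, pvFoldT]
  unfold pvVals
  have hg := pvCountA_eq_dups (pvVals legs "game_id") (pvVals_ne_empty legs "game_id")
  have ht := pvCountA_eq_dups (pvVals legs "team") (pvVals_ne_empty legs "team")
  unfold pvCountA pvVals at hg ht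
  simp only [PySem.Set.len]
  rw [← hg, ← ht]
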